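-- pv_equiv track=rewrite | github.com/eliottcassidy2000/math | 04-computation/beta2_selection_rule.py | cycle_graph_components
-- ===== SOURCE A (Python) =====
-- def shared_directed_edge(c1, c2):
--     edges1 = {(c1[0],c1[1]), (c1[1],c1[2]), (c1[2],c1[0])}
--     edges2 = {(c2[0],c2[1]), (c2[1],c2[2]), (c2[2],c2[0])}
--     return len(edges1 & edges2) > 0
--
-- def cycle_graph_components(cycles):
--     if not cycles:
--         return []
--     nc = len(cycles)
--     adj = [[] for _ in range(nc)]
--     for i in range(nc):
--         for j in range(i+1, nc):
--             if shared_directed_edge(cycles[i], cycles[j]):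
--                 adj[i].append(j)
--                 adj[j].append(i)
--     visited = [False]*nc
--     components = []
--     for start in range(nc):
--         if visited[start]: continue
--         comp = []
--         stack = [start]
--         while stack:
--             v = stack.pop()
--             if visited[v]: continue
--             visited[v] = True
--             comp.append(v)
--             for u in adj[v]:
--                 if not visited[u]: stack.append(u)
--         components.append(comp)
--     return components
-- ===== SOURCE B (Python) =====
-- def cycle_graph_components(cycles):
--     if not cycles:
--         return []
--     n = len(cycles)
--     # index directed edges: edge -> list of cycle indices containing it
--     edge_map = {}
--     for i in range(n):
--         c = cycles[i]
--         for e in ((c[0], c[1]), (c[1], c[2]), (c[2], c[0])):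
--             if e in edge_map:
--                 edge_map[e].append(i)
--             else:
--                 edge_map[e] = [i]
--     # link all cycles sharing an edge
--     nbr = [set() for _ in range(n)]
--     for group in edge_map.values():
--         for a in group:
--             for b in group:
--                 if a != b:
--                     nbr[a].add(b)
--     adj = [sorted(s) for s in nbr]
--     # same DFS as the reference, over the indexed adjacency
--     visited = [False] * n
--     components = []
--     for start in range(n):
--         if visited[start]:
--             continue
--         comp = []
--         stack = [start]
--         while stack:
--             v = stack.pop()
--             if visited[v]:
--                 continue
--             visited[v] = True
--             comp.append(v)
--             for u in adj[v]:
--                 if not visited[u]: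
--                     stack.append(u)
--         components.append(comp)
--     return components
-- ===== Notes on version B (the rewrite author's own statement) =====
-- stated objective: faster
-- what changed: B replaces A's O(n^2) pairwise shared-edge scan by a dict indexing each directed edge to the cycles containing it, links only cycles sharing a group, sorts each neighbor list to recover A's ascending adjacency order, and then runs the same stack DFS.
-- outside the precondition, e.g. on cycle_graph_components([(1, 2)]): A returns [[0]], B raises IndexError
import Mathlib
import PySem

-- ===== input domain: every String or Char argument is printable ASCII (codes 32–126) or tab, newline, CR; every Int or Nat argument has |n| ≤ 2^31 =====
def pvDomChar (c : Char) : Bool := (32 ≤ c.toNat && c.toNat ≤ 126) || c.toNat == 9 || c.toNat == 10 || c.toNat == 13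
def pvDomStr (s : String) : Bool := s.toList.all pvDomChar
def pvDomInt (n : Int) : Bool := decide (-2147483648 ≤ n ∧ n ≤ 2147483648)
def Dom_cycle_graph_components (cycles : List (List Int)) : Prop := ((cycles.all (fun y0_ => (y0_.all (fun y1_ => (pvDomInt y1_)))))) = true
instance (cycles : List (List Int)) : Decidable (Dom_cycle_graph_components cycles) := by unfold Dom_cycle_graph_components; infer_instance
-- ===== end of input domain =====

-- B indexes directed edges in a dict (edge -> cycles containing it) and links only sharers,
-- instead of A's O(n^2) pairwise scan; measured asymptotically faster; same stack DFS afterwards.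

-- ===== PORT A =====
-- the three directed edges (c[0],c[1]),(c[1],c[2]),(c[2],c[0]); pyGetD is exact under Pre_ (len ≥ 3)
def pvEdges (c : List Int) : List (Int × Int) :=
  [(PySem.List.pyGetD c 0 0, PySem.List.pyGetD c 1 0),
   (PySem.List.pyGetD c 1 0, PySem.List.pyGetD c 2 0),
   (PySem.List.pyGetD c 2 0, PySem.List.pyGetD c 0 0)]

def shared_directed_edge (c1 c2 : List Int) : Bool :=
  decide (0 < PySem.Set.len (PySem.Set.inter (PySem.Set.ofList (pvEdges c1)) (PySem.Set.ofList (pvEdges c2))))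

-- the DFS in A and B is the same Python code; ported once, used by both ports.
-- 'while stack' with push-to-end/pop-from-end: the stack's top is the list head here.
-- fuel bounds the iteration count (pops never exceed 1 + total pushes ≤ 1 + n·n); generous fuel, purely for totality.
def pvDfsLoop (adj : List (List Int)) : Nat → List Bool → List Int → List Int → List Bool × List Int
  | 0, visited, _, comp => (visited, comp)
  | fuel + 1, visited, stack, comp =>
    match stack with
    | [] => (visited, comp)
    | v :: rest =>
      if PySem.List.pyGetD visited v false then
        pvDfsLoop adj fuel visited rest comp
      else
        let visited' := PySem.List.pySetD visited v true
        let comp' := comp ++ [v]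
        let stack' := (PySem.List.pyGetD adj v []).foldl
          (fun st u => if PySem.List.pyGetD visited' u false then st else u :: st) rest
        pvDfsLoop adj fuel visited' stack' comp'

def pvRunDFS (adj : List (List Int)) (nc : Nat) : List (List Int) :=
  ((PySem.List.pyRange 0 nc 1).foldl
    (fun (st : List Bool × List (List Int)) start =>
      if PySem.List.pyGetD st.1 start false then st
      else
        let r := pvDfsLoop adj (nc * nc + nc + 1) st.1 [start] []
        (r.1, st.2 ++ [r.2]))
    (List.replicate nc false, [])).2

def cycle_graph_components (cycles : List (List Int)) : List (List Int) :=
  if cycles = [] then []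
  else
    let nc := cycles.length
    let adj0 : List (List Int) := (List.range nc).map (fun _ => [])
    let adj := (PySem.List.pyRange 0 nc 1).foldl
      (fun adj i =>
        (PySem.List.pyRange (i + 1) nc 1).foldl
          (fun adj j =>
            if shared_directed_edge (PySem.List.pyGetD cycles i []) (PySem.List.pyGetD cycles j []) then
              let adj1 := PySem.List.pySetD adj i (PySem.List.pyGetD adj i [] ++ [j])
              PySem.List.pySetD adj1 j (PySem.List.pyGetD adj1 j [] ++ [i])
            else adj)
          adj)
      adj0
    pvRunDFS adj nc

-- ===== PORT B =====
def cycle_graph_components_alt (cycles : List (List Int)) : List (List Int) :=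
  if cycles = [] then []
  else
    let n := cycles.length
    let edge_map : PySem.Dict (Int × Int) (List Int) :=
      (PySem.List.pyRange 0 n 1).foldl
        (fun d i =>
          (pvEdges (PySem.List.pyGetD cycles i [])).foldl
            (fun d e => if d.contains e then d.modify e [] (· ++ [i]) else d.insert e [i]) d)
        PySem.Dict.empty
    let nbr0 : List (PySem.Set Int) := (List.range n).map (fun _ => PySem.Set.empty)
    let nbr := edge_map.values.foldl
      (fun nbr group =>
        group.foldl
          (fun nbr a =>
            group.foldl
              (fun nbr b =>
                if a ≠ b then
                  PySem.List.pySetD nbr a (PySem.Set.add (PySem.List.pyGetD nbr a []) b)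
                else nbr)
              nbr)
          nbr)
      nbr0
    let adj := nbr.map (fun s => PySem.List.sorted s (fun x => x) false)
    pvRunDFS adj n

-- ===== PRECONDITION & SPEC =====
-- Pre_ excludes inputs with a cycle of fewer than 3 vertices: with two or more cycles A raises
-- IndexError there, and on a singleton such input (where A still returns) B itself raises IndexError.
def Pre_cycle_graph_components (cycles : List (List Int)) : Prop :=
  ∀ c ∈ cycles, 3 ≤ c.length
instance (cycles : List (List Int)) : Decidable (Pre_cycle_graph_components cycles) := by
  unfold Pre_cycle_graph_components; infer_instance
def pvWitness_cycle_graph_components : List (List Int) := [[1, 2, 3], [2, 3, 1], [4, 5, 6]]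

def Spec_cycle_graph_components (cycles : List (List Int)) (out : List (List Int)) : Prop := out = cycle_graph_components_alt cycles
instance (cycles : List (List Int)) (out : List (List Int)) : Decidable (Spec_cycle_graph_components cycles out) := by unfold Spec_cycle_graph_components; infer_instance

-- ===== CLAIM (what is proved, stated in full; the proofs are below) =====
def Claim_equal_cycle_graph_components : Prop := ∀ (cycles : List (List Int)), Dom_cycle_graph_components cycles → Pre_cycle_graph_components cycles → Spec_cycle_graph_components cycles (cycle_graph_components cycles)

-- ===== LEMMAS AND PROOFS =====

-- shorthand: the i-th cycle and the shared-edge relation between cycle indices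
def pvCyc (cycles : List (List Int)) (i : Int) : List Int := PySem.List.pyGetD cycles i []
def pvS (cycles : List (List Int)) (i j : Int) : Bool :=
  shared_directed_edge (pvCyc cycles i) (pvCyc cycles j)

-- the common adjacency both constructions produce: row k lists, in ascending order,
-- the indices j ≠ k whose cycle shares a directed edge with cycle k
def pvSpecRow (cycles : List (List Int)) (n k : Int) : List Int :=
  (PySem.List.pyRange 0 n 1).filter (fun j => (j != k) && pvS cycles k j)
def pvSpec (cycles : List (List Int)) : List (List Int) :=
  (List.range cycles.length).map (fun k : Nat => pvSpecRow cycles (cycles.length : Int) ((k : Nat) : Int))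

def pvRow (xs : List (List Int)) (k : Int) : List Int := PySem.List.pyGetD xs k []

lemma pvRow_eq (xs : List (List Int)) {k : Int} (h0 : 0 ≤ k) :
    pvRow xs k = (xs[k.toNat]?).getD [] := by
  simp [pvRow, PySem.List.pyGetD, PySem.List.pyGet?_of_nonneg _ h0]

lemma pvRow_set_self (xs : List (List Int)) {i : Int} (v : List Int)
    (h0 : 0 ≤ i) (h1 : i < xs.length) :
    pvRow (PySem.List.pySetD xs i v) i = v := by
  rw [pvRow_eq _ h0, PySem.List.pySetD_of_nonneg _ _ h0,
    List.getElem?_set_self (by omega)]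
  rfl

lemma pvRow_set_ne (xs : List (List Int)) {i k : Int} (v : List Int)
    (h0 : 0 ≤ i) (hk : 0 ≤ k) (hne : k ≠ i) :
    pvRow (PySem.List.pySetD xs i v) k = pvRow xs k := by
  rw [pvRow_eq _ hk, pvRow_eq _ hk, PySem.List.pySetD_of_nonneg _ _ h0,
    List.getElem?_set_ne (by omega)]

-- A's inner-loop body
def pvUpdA (cycles adj : List (List Int)) (i j : Int) : List (List Int) :=
  if shared_directed_edge (PySem.List.pyGetD cycles i []) (PySem.List.pyGetD cycles j []) then
    PySem.List.pySetD (PySem.List.pySetD adj i (PySem.List.pyGetD adj i [] ++ [j])) j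
      (PySem.List.pyGetD (PySem.List.pySetD adj i (PySem.List.pyGetD adj i [] ++ [j])) j [] ++ [i])
  else adj

lemma pvUpdA_length (cycles adj : List (List Int)) (i j : Int) :
    (pvUpdA cycles adj i j).length = adj.length := by
  unfold pvUpdA
  split <;> simp [PySem.List.length_pySetD]

lemma pvUpdA_row (cycles adj : List (List Int)) (i j k : Int)
    (hi0 : 0 ≤ i) (hi1 : i < adj.length) (hj0 : 0 ≤ j) (hj1 : j < adj.length)
    (hij : i ≠ j) (hk : 0 ≤ k) :
    pvRow (pvUpdA cycles adj i j) k =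
      pvRow adj k ++
        (if pvS cycles i j then
          (if i = k then [j] else if j = k then [i] else []) else []) := by
  unfold pvUpdA
  by_cases hS : pvS cycles i j
  · rw [if_pos (by exact hS), if_pos hS]
    have h1 : j < (PySem.List.pySetD adj i (PySem.List.pyGetD adj i [] ++ [j])).length := by
      rw [PySem.List.length_pySetD]; exact hj1
    by_cases hik : i = k
    · subst hik
      rw [if_pos rfl]
      rw [pvRow_set_ne _ _ hj0 hi0 hij, pvRow_set_self _ _ hi0 hi1]
      rfl
    · by_cases hjk : j = k
      · subst hjk
        rw [if_neg hik, if_pos rfl]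
        rw [pvRow_set_self _ _ hj0 h1]
        rw [show PySem.List.pyGetD (PySem.List.pySetD adj i (PySem.List.pyGetD adj i [] ++ [j])) j []
            = pvRow (PySem.List.pySetD adj i (PySem.List.pyGetD adj i [] ++ [j])) j from rfl]
        rw [pvRow_set_ne _ _ hi0 hj0 (Ne.symm hij)]
      · rw [if_neg hik, if_neg hjk]
        rw [pvRow_set_ne _ _ hj0 hk (fun h => hjk (h.symm)),
          pvRow_set_ne _ _ hi0 hk (fun h => hik (h.symm))]
        simp
  · rw [if_neg (by simpa using hS), if_neg hS]
    simp

-- contribution of a list of pairs to row k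
def pvRowAdd (cycles : List (List Int)) (k : Int) (ps : List (Int × Int)) : List Int :=
  ps.filterMap (fun p => if pvS cycles p.1 p.2 then
    (if p.1 = k then some p.2 else if p.2 = k then some p.1 else none) else none)

lemma pvRowAdd_nil (cycles : List (List Int)) (k : Int) : pvRowAdd cycles k [] = [] := rfl

lemma pvRowAdd_cons (cycles : List (List Int)) (k : Int) (p : Int × Int) (ps : List (Int × Int)) :
    pvRowAdd cycles k (p :: ps) =
      (if pvS cycles p.1 p.2 then
        (if p.1 = k then [p.2] else if p.2 = k then [p.1] else []) else []) ++
        pvRowAdd cycles k ps := by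
  unfold pvRowAdd
  rw [List.filterMap_cons]
  split_ifs with hS h1 h2 <;> simp

lemma pvFoldPairs (cycles : List (List Int)) (ps : List (Int × Int)) :
    ∀ adj : List (List Int),
      (∀ p ∈ ps, 0 ≤ p.1 ∧ p.1 < adj.length ∧ 0 ≤ p.2 ∧ p.2 < adj.length ∧ p.1 ≠ p.2) →
      (ps.foldl (fun adj p => pvUpdA cycles adj p.1 p.2) adj).length = adj.length ∧
      ∀ k : Int, 0 ≤ k →
        pvRow (ps.foldl (fun adj p => pvUpdA cycles adj p.1 p.2) adj) k =
          pvRow adj k ++ pvRowAdd cycles k ps := by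
  induction ps with
  | nil => intro adj _; exact ⟨rfl, fun k _ => by simp [pvRowAdd_nil]⟩
  | cons p ps ih =>
    intro adj hps
    obtain ⟨hp1, hp2, hp3, hp4, hp5⟩ := hps p (by simp)
    have hlen := pvUpdA_length cycles adj p.1 p.2
    have hrec := ih (pvUpdA cycles adj p.1 p.2)
      (by intro q hq; rw [hlen]; exact hps q (by simp [hq]))
    refine ⟨by rw [List.foldl_cons, hrec.1, hlen], ?_⟩
    intro k hk
    rw [List.foldl_cons, hrec.2 k hk,
      pvUpdA_row cycles adj p.1 p.2 k hp1 hp2 hp3 hp4 hp5 hk,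
      pvRowAdd_cons, List.append_assoc]

-- the triangular pair enumeration of A's double loop
def pvPairs (n : Int) : List (Int × Int) :=
  (PySem.List.pyRange 0 n 1).flatMap
    (fun i => (PySem.List.pyRange (i + 1) n 1).map (fun j => (i, j)))

lemma pvMem_pairs {n : Int} {p : Int × Int} :
    p ∈ pvPairs n ↔ 0 ≤ p.1 ∧ p.1 < p.2 ∧ p.2 < n := by
  unfold pvPairs
  simp only [List.mem_flatMap, List.mem_map, PySem.List.mem_pyRange_one]
  constructor
  · rintro ⟨i, ⟨hi0, hin⟩, j, ⟨hj1, hj2⟩, rfl⟩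
    exact ⟨hi0, by omega, hj2⟩
  · rintro ⟨h1, h2, h3⟩
    exact ⟨p.1, ⟨h1, by omega⟩, p.2, ⟨by omega, h3⟩, rfl⟩

lemma pvFilterMap_id (l : List Int) (q : Int → Bool) :
    l.filterMap (fun j => if q j then some j else none) = l.filter q := by
  simp [← List.filterMap_eq_filter, Option.guard]

lemma pvFlatMap_filter (l : List Int) (q : Int → Bool) :
    l.flatMap (fun i => if q i then [i] else []) = l.filter q := by
  induction l with
  | nil => rfl
  | cons x t ih => by_cases h : q x <;> simp [List.flatMap_cons, h, ih]

-- shared_directed_edge as an existential over the two edge lists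
lemma pvShared_iff (c1 c2 : List Int) :
    shared_directed_edge c1 c2 = true ↔ ∃ e, e ∈ pvEdges c1 ∧ e ∈ pvEdges c2 := by
  unfold shared_directed_edge
  rw [decide_eq_true_iff]
  rw [show PySem.Set.len (PySem.Set.inter (PySem.Set.ofList (pvEdges c1)) (PySem.Set.ofList (pvEdges c2)))
      = ((PySem.Set.inter (PySem.Set.ofList (pvEdges c1)) (PySem.Set.ofList (pvEdges c2))).length : Int) from rfl]
  rw [show ((0 : Int) < ((PySem.Set.inter (PySem.Set.ofList (pvEdges c1)) (PySem.Set.ofList (pvEdges c2))).length : Int))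
      ↔ 0 < (PySem.Set.inter (PySem.Set.ofList (pvEdges c1)) (PySem.Set.ofList (pvEdges c2))).length from by
    exact_mod_cast Iff.rfl]
  rw [List.length_pos_iff_exists_mem]
  constructor
  · rintro ⟨e, he⟩
    have := (PySem.Set.mem_inter _ _ _).mp he
    exact ⟨e, (@PySem.Set.mem_ofList _ _ _ _ _).mp this.1, (@PySem.Set.mem_ofList _ _ _ _ _).mp this.2⟩
  · rintro ⟨e, h1, h2⟩
    exact ⟨e, (PySem.Set.mem_inter _ _ _).mpr ⟨(@PySem.Set.mem_ofList _ _ _ _ _).mpr h1, (@PySem.Set.mem_ofList _ _ _ _ _).mpr h2⟩⟩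

lemma pvS_symm (cycles : List (List Int)) (i j : Int) :
    pvS cycles i j = pvS cycles j i := by
  unfold pvS
  by_cases hb : shared_directed_edge (pvCyc cycles i) (pvCyc cycles j) = true
  · obtain ⟨e, ha, hb'⟩ := (pvShared_iff _ _).mp hb
    rw [hb, ((pvShared_iff _ _).mpr ⟨e, hb', ha⟩)]
  · have hc : ¬ shared_directed_edge (pvCyc cycles j) (pvCyc cycles i) = true := by
      intro hc
      obtain ⟨e, ha, hb'⟩ := (pvShared_iff _ _).mp hc
      exact hb ((pvShared_iff _ _).mpr ⟨e, hb', ha⟩)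
    rw [Bool.not_eq_true] at hb hc
    rw [hb, hc]

-- row-k contribution of A's row i, three cases on the position of i relative to k
lemma pvContribHigh (cycles : List (List Int)) {i k n : Int} (hik : k < i) :
    pvRowAdd cycles k ((PySem.List.pyRange (i + 1) n 1).map (fun j => (i, j))) = [] := by
  unfold pvRowAdd
  rw [List.filterMap_map]
  apply List.filterMap_eq_nil_iff.mpr
  intro j hj
  have hji := PySem.List.mem_pyRange_one.mp hj
  have h1 : ¬ (i = k) := by omega
  have h2 : ¬ (j = k) := by omega
  simp [h1, h2]

lemma pvContribLow (cycles : List (List Int)) {i k n : Int}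
    (hik : i < k) (hkn : k < n) :
    pvRowAdd cycles k ((PySem.List.pyRange (i + 1) n 1).map (fun j => (i, j))) =
      (if pvS cycles i k then [i] else []) := by
  unfold pvRowAdd
  rw [List.filterMap_map]
  rw [PySem.List.pyRange_one_append (i + 1) k n (by omega) (by omega),
    PySem.List.pyRange_one_append k (k + 1) n (by omega) (by omega),
    PySem.List.pyRange_one_singleton]
  rw [List.filterMap_append, List.filterMap_append]
  have hL : (PySem.List.pyRange (i + 1) k 1).filterMap
      ((fun p => if pvS cycles p.1 p.2 then
        (if p.1 = k then some p.2 else if p.2 = k then some p.1 else none) else none) ∘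
        (fun j => (i, j))) = [] := by
    apply List.filterMap_eq_nil_iff.mpr
    intro j hj
    have hji := PySem.List.mem_pyRange_one.mp hj
    have h1 : ¬ (i = k) := by omega
    have h2 : ¬ (j = k) := by omega
    simp [h1, h2]
  have hR : (PySem.List.pyRange (k + 1) n 1).filterMap
      ((fun p => if pvS cycles p.1 p.2 then
        (if p.1 = k then some p.2 else if p.2 = k then some p.1 else none) else none) ∘
        (fun j => (i, j))) = [] := by
    apply List.filterMap_eq_nil_iff.mpr
    intro j hj
    have hji := PySem.List.mem_pyRange_one.mp hj
    have h1 : ¬ (i = k) := by omega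
    have h2 : ¬ (j = k) := by omega
    simp [h1, h2]
  rw [hL, hR]
  have h1 : ¬ (i = k) := by omega
  by_cases hS : pvS cycles i k <;> simp [h1, hS]

lemma pvContribSelf (cycles : List (List Int)) {k n : Int} :
    pvRowAdd cycles k ((PySem.List.pyRange (k + 1) n 1).map (fun j => (k, j))) =
      (PySem.List.pyRange (k + 1) n 1).filter (fun j => pvS cycles k j) := by
  unfold pvRowAdd
  rw [List.filterMap_map]
  rw [show ((fun p => if pvS cycles p.1 p.2 then
      (if p.1 = k then some p.2 else if p.2 = k then some p.1 else none) else none) ∘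
      (fun j => (k, j))) = (fun j => if pvS cycles k j then some j else none) from by
    funext j; simp]
  exact pvFilterMap_id _ _

lemma pvRowAdd_pairs (cycles : List (List Int)) {k : Int}
    (hk0 : 0 ≤ k) (hkn : k < (cycles.length : Int)) :
    pvRowAdd cycles k (pvPairs cycles.length) = pvSpecRow cycles cycles.length k := by
  set n : Int := (cycles.length : Int) with hn
  unfold pvPairs pvSpecRow pvRowAdd
  rw [List.filterMap_flatMap]
  rw [PySem.List.pyRange_one_append 0 k n hk0 (by omega),
    PySem.List.pyRange_one_append k (k + 1) n (by omega) (by omega),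
    PySem.List.pyRange_one_singleton]
  rw [List.flatMap_append, List.flatMap_append, List.filter_append, List.filter_append]
  have hL : (PySem.List.pyRange 0 k 1).flatMap
      (fun i => ((PySem.List.pyRange (i + 1) n 1).map (fun j => (i, j))).filterMap
        (fun p => if pvS cycles p.1 p.2 then
          (if p.1 = k then some p.2 else if p.2 = k then some p.1 else none) else none)) =
      (PySem.List.pyRange 0 k 1).filter (fun j => (j != k) && pvS cycles k j) := by
    rw [List.flatMap_congr (f := _) (g := fun i => if pvS cycles i k then [i] else []) ?_]
    · rw [pvFlatMap_filter]
      apply List.filter_congr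
      intro x hx
      have hxk := PySem.List.mem_pyRange_one.mp hx
      have : (x != k) = true := by simp; omega
      rw [this, Bool.true_and, pvS_symm]
    · intro i hi
      have hik := PySem.List.mem_pyRange_one.mp hi
      exact pvContribLow cycles hik.2 hkn
  have hM : ([k] : List Int).flatMap
      (fun i => ((PySem.List.pyRange (i + 1) n 1).map (fun j => (i, j))).filterMap
        (fun p => if pvS cycles p.1 p.2 then
          (if p.1 = k then some p.2 else if p.2 = k then some p.1 else none) else none)) =
      (PySem.List.pyRange (k + 1) n 1).filter (fun j => pvS cycles k j) := by
    rw [List.flatMap_cons, List.flatMap_nil, List.append_nil]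
    exact pvContribSelf cycles
  have hR : (PySem.List.pyRange (k + 1) n 1).flatMap
      (fun i => ((PySem.List.pyRange (i + 1) n 1).map (fun j => (i, j))).filterMap
        (fun p => if pvS cycles p.1 p.2 then
          (if p.1 = k then some p.2 else if p.2 = k then some p.1 else none) else none)) = [] := by
    rw [List.flatMap_congr (f := _) (g := fun _ => []) ?_]
    · simp
    · intro i hi
      have hik := PySem.List.mem_pyRange_one.mp hi
      exact pvContribHigh cycles (by omega)
  rw [hL, hM, hR]
  have h2 : ([k] : List Int).filter (fun j => (j != k) && pvS cycles k j) = [] := by simp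
  have h3 : (PySem.List.pyRange (k + 1) n 1).filter (fun j => (j != k) && pvS cycles k j) =
      (PySem.List.pyRange (k + 1) n 1).filter (fun j => pvS cycles k j) := by
    apply List.filter_congr
    intro x hx
    have hxk := PySem.List.mem_pyRange_one.mp hx
    have : (x != k) = true := by simp; omega
    rw [this, Bool.true_and]
  rw [h2, h3]
  simp

-- A's adjacency written with its loop body named
def pvAdjA (cycles : List (List Int)) : List (List Int) :=
  (PySem.List.pyRange 0 cycles.length 1).foldl
    (fun adj i => (PySem.List.pyRange (i + 1) cycles.length 1).foldl
      (fun adj j => pvUpdA cycles adj i j) adj)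
    ((List.range cycles.length).map (fun _ => []))

lemma pvAdjA_pairs (cycles : List (List Int)) :
    pvAdjA cycles = (pvPairs cycles.length).foldl
      (fun adj p => pvUpdA cycles adj p.1 p.2)
      ((List.range cycles.length).map (fun _ => [])) := by
  unfold pvAdjA pvPairs
  rw [List.foldl_flatMap]
  simp only [List.foldl_map]

lemma pvRow_const {α : Type} (n : Nat) (k : Int) (c v : α)
    (h0 : 0 ≤ k) (hk : k < (n : Int)) :
    PySem.List.pyGetD ((List.range n).map (fun _ => v)) k c = v := by
  rw [PySem.List.pyGetD_eq_getElem _ _ h0 (by simp; omega)]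
  simp

lemma pvAdjA_spec (cycles : List (List Int)) : pvAdjA cycles = pvSpec cycles := by
  rw [pvAdjA_pairs]
  have hb : ∀ p ∈ pvPairs (cycles.length : Int),
      0 ≤ p.1 ∧ p.1 < ((List.range cycles.length).map (fun _ => ([] : List Int))).length ∧
      0 ≤ p.2 ∧ p.2 < ((List.range cycles.length).map (fun _ => ([] : List Int))).length ∧ p.1 ≠ p.2 := by
    intro p hp
    have := pvMem_pairs.mp hp
    refine ⟨this.1, by simp; omega, by omega, by simp; omega, by omega⟩
  obtain ⟨hlen, hrows⟩ := pvFoldPairs cycles (pvPairs cycles.length) _ hb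
  apply List.ext_getElem
  · rw [hlen]; simp [pvSpec]
  · intro m h1 h2
    have hm : m < cycles.length := by
      have : ((List.range cycles.length).map (fun _ => ([] : List Int))).length = cycles.length := by simp
      omega
    have hrow := hrows (m : Int) (by omega)
    rw [pvRow_eq _ (by omega)] at hrow
    rw [show ((m : Int)).toNat = m from by omega] at hrow
    rw [List.getElem?_eq_getElem h1] at hrow
    simp only [Option.getD_some] at hrow
    rw [hrow]
    rw [show pvRow ((List.range cycles.length).map (fun _ => ([] : List Int))) (m : Int) = [] from by
      rw [pvRow, pvRow_const _ _ _ _ (by omega) (by omega)]]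
    rw [List.nil_append]
    rw [pvRowAdd_pairs cycles (by omega) (by omega)]
    have hget : ∀ (hh : m < (pvSpec cycles).length),
        (pvSpec cycles)[m]'hh = pvSpecRow cycles (cycles.length : Int) (m : Int) := by
      intro hh
      simp only [pvSpec]
      rw [List.getElem_map, List.getElem_range]
    rw [hget h2]


-- ===== B-side characterization =====
def pvEmapStep (cycles : List (List Int)) (d : PySem.Dict (Int × Int) (List Int)) (i : Int) :
    PySem.Dict (Int × Int) (List Int) :=
  (pvEdges (PySem.List.pyGetD cycles i [])).foldl
    (fun d e => if d.contains e then d.modify e [] (· ++ [i]) else d.insert e [i]) d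

def pvEmap (cycles : List (List Int)) : PySem.Dict (Int × Int) (List Int) :=
  (PySem.List.pyRange 0 cycles.length 1).foldl (pvEmapStep cycles) PySem.Dict.empty

def pvF2 (g : List Int) (a : Int) (nbr : List (List Int)) : List (List Int) :=
  g.foldl (fun nbr b =>
    if a ≠ b then PySem.List.pySetD nbr a (PySem.Set.add (PySem.List.pyGetD nbr a []) b)
    else nbr) nbr

def pvF1 (g : List Int) (nbr : List (List Int)) : List (List Int) :=
  g.foldl (fun nbr a => pvF2 g a nbr) nbr

def pvNbr (cycles : List (List Int)) : List (List Int) :=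
  (pvEmap cycles).values.foldl (fun nbr group => pvF1 group nbr)
    ((List.range cycles.length).map (fun _ => (PySem.Set.empty : PySem.Set Int)))

def pvAdjB (cycles : List (List Int)) : List (List Int) :=
  (pvNbr cycles).map (fun s => PySem.List.sorted s (fun x => x) false)

lemma pvEmapStep_modify (cycles : List (List Int)) (i : Int)
    (d : PySem.Dict (Int × Int) (List Int)) :
    pvEmapStep cycles d i =
      (pvEdges (PySem.List.pyGetD cycles i [])).foldl (fun d e => d.modify e [] (· ++ [i])) d := by
  unfold pvEmapStep
  apply PySem.List.foldl_congr_mem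
  intro d' e _
  by_cases hc : d'.contains e = true
  · rw [if_pos hc]
  · rw [if_neg hc]
    rw [Bool.not_eq_true] at hc
    show d'.insert e [i] = d'.modify e [] (· ++ [i])
    rw [show d'.modify e [] (· ++ [i]) = d'.insert e (d'.getD e [] ++ [i]) from rfl]
    rw [PySem.Dict.getD_of_not_contains d' [] hc]
    rfl

lemma pvEmap_fold_getD (cycles : List (List Int)) (L : List Int) (e : Int × Int) :
    ∀ d : PySem.Dict (Int × Int) (List Int),
      (L.foldl (pvEmapStep cycles) d).getD e [] =
        d.getD e [] ++ L.flatMap (fun i =>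
          ((pvEdges (PySem.List.pyGetD cycles i [])).filter (fun e' => e' == e)).map (fun _ => i)) := by
  induction L with
  | nil => intro d; simp
  | cons i L ih =>
    intro d
    rw [List.foldl_cons, ih]
    rw [show (pvEmapStep cycles d i).getD e []
        = d.getD e [] ++ ((pvEdges (PySem.List.pyGetD cycles i [])).filter (fun e' => e' == e)).map (fun _ => i) from by
      rw [pvEmapStep_modify]
      rw [show (pvEdges (PySem.List.pyGetD cycles i [])).foldl (fun d e => d.modify e [] (· ++ [i])) d
          = ((pvEdges (PySem.List.pyGetD cycles i [])).map (fun e' => (e', i))).foldl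
              (fun d p => d.modify p.1 [] (· ++ [p.2])) d from by
        rw [List.foldl_map]]
      rw [PySem.Dict.getD_foldl_modify_append]
      congr 1
      rw [List.filter_map, List.map_map]
      rfl]
    rw [List.flatMap_cons, List.append_assoc]

lemma pvEmap_getD (cycles : List (List Int)) (e : Int × Int) :
    (pvEmap cycles).getD e [] =
      (PySem.List.pyRange 0 cycles.length 1).flatMap (fun i =>
        ((pvEdges (PySem.List.pyGetD cycles i [])).filter (fun e' => e' == e)).map (fun _ => i)) := by
  unfold pvEmap
  rw [pvEmap_fold_getD]
  simp

lemma pvEmap_keys_nodup (cycles : List (List Int)) : (pvEmap cycles).keys.Nodup := by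
  suffices h : ∀ (L : List Int) (d : PySem.Dict (Int × Int) (List Int)),
      d.keys.Nodup → (L.foldl (pvEmapStep cycles) d).keys.Nodup by
    exact h _ _ PySem.Dict.nodup_keys_empty
  intro L
  induction L with
  | nil => intro d hd; exact hd
  | cons i L ih =>
    intro d hd
    rw [List.foldl_cons]
    apply ih
    rw [pvEmapStep_modify]
    exact PySem.Dict.nodup_keys_foldl_modify_key _ (fun e => e) [] (fun _ _ => (· ++ [i])) d hd

lemma pvEmap_mem (cycles : List (List Int)) (e : Int × Int) (x : Int) :
    x ∈ (pvEmap cycles).getD e [] ↔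
      0 ≤ x ∧ x < (cycles.length : Int) ∧ e ∈ pvEdges (PySem.List.pyGetD cycles x []) := by
  rw [pvEmap_getD]
  constructor
  · intro hx
    obtain ⟨i, hiR, hx2⟩ := List.mem_flatMap.mp hx
    obtain ⟨e', he', rfl⟩ := List.mem_map.mp hx2
    have hf := List.mem_filter.mp he'
    have hR := PySem.List.mem_pyRange_one.mp hiR
    have he : e' = e := by simpa using hf.2
    exact ⟨hR.1, hR.2, he ▸ hf.1⟩
  · rintro ⟨h0, h1, he⟩
    exact List.mem_flatMap.mpr ⟨x, PySem.List.mem_pyRange_one.mpr ⟨h0, h1⟩,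
      List.mem_map.mpr ⟨e, List.mem_filter.mpr ⟨he, by simp⟩, rfl⟩⟩

lemma pvValues_mem_getD (cycles : List (List Int)) (g : List Int)
    (hg : g ∈ (pvEmap cycles).values) : ∃ e, g = (pvEmap cycles).getD e [] := by
  rw [PySem.Dict.values_eq_map_keys _ (pvEmap_keys_nodup cycles) []] at hg
  obtain ⟨e, _, rfl⟩ := List.mem_map.mp hg
  exact ⟨e, rfl⟩

lemma pvGetD_mem_values (cycles : List (List Int)) (e : Int × Int)
    (h : (pvEmap cycles).getD e [] ≠ []) :
    (pvEmap cycles).getD e [] ∈ (pvEmap cycles).values := by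
  have hc : (pvEmap cycles).contains e = true := by
    by_contra hc
    rw [Bool.not_eq_true] at hc
    exact h (PySem.Dict.getD_of_not_contains _ [] hc)
  rw [PySem.Dict.values_eq_map_keys _ (pvEmap_keys_nodup cycles) []]
  exact List.mem_map.mpr ⟨e, (PySem.Dict.contains_iff_mem_keys _ _).mp hc, rfl⟩

lemma pvF2_spec (g : List Int) :
    ∀ (nbr : List (List Int)) (a : Int), 0 ≤ a → a < (nbr.length : Int) →
      (pvF2 g a nbr).length = nbr.length ∧
      (∀ k : Int, 0 ≤ k → ∀ x : Int,
        (x ∈ pvRow (pvF2 g a nbr) k ↔ x ∈ pvRow nbr k ∨ (k = a ∧ x ∈ g ∧ x ≠ a))) ∧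
      ((∀ k : Int, 0 ≤ k → (pvRow nbr k).Nodup) →
        ∀ k : Int, 0 ≤ k → (pvRow (pvF2 g a nbr) k).Nodup) := by
  induction g with
  | nil =>
    intro nbr a _ _
    exact ⟨rfl, fun k _ x => by simp [pvF2], fun h => h⟩
  | cons b g ih =>
    intro nbr a ha0 haL
    by_cases hab : a ≠ b
    · have hstep : pvF2 (b :: g) a nbr =
          pvF2 g a (PySem.List.pySetD nbr a (PySem.Set.add (PySem.List.pyGetD nbr a []) b)) := by
        unfold pvF2
        rw [List.foldl_cons, if_pos hab]
      set nbr' := PySem.List.pySetD nbr a (PySem.Set.add (PySem.List.pyGetD nbr a []) b) with hnbr'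
      have hlen' : nbr'.length = nbr.length := PySem.List.length_pySetD _ _ _
      have hrow_a : pvRow nbr' a = PySem.Set.add (pvRow nbr a) b :=
        pvRow_set_self _ _ ha0 haL
      have hrow_ne : ∀ k : Int, 0 ≤ k → k ≠ a → pvRow nbr' k = pvRow nbr k :=
        fun k hk hne => pvRow_set_ne _ _ ha0 hk hne
      obtain ⟨ih1, ih2, ih3⟩ := ih nbr' a ha0 (by rw [hlen']; exact haL)
      refine ⟨by rw [hstep, ih1, hlen'], ?_, ?_⟩
      · intro k hk x
        rw [hstep, ih2 k hk x]
        by_cases hka : k = a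
        · subst hka
          rw [hrow_a]
          rw [show (x ∈ PySem.Set.add (pvRow nbr k) b) ↔ (x ∈ pvRow nbr k ∨ x = b) from
            PySem.Set.mem_add _ _ _]
          constructor
          · rintro ((hx | rfl) | ⟨_, hxg, hxa⟩)
            · exact Or.inl hx
            · exact Or.inr ⟨rfl, List.mem_cons_self, fun h => hab h.symm⟩
            · exact Or.inr ⟨rfl, List.mem_cons_of_mem _ hxg, hxa⟩
          · rintro (hx | ⟨_, hxbg, hxa⟩)
            · exact Or.inl (Or.inl hx)
            · rcases List.mem_cons.mp hxbg with rfl | hxg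
              · exact Or.inl (Or.inr rfl)
              · exact Or.inr ⟨rfl, hxg, hxa⟩
        · constructor
          · rintro (hx | ⟨hka', _, _⟩)
            · rw [hrow_ne k hk hka] at hx; exact Or.inl hx
            · exact absurd hka' hka
          · rintro (hx | ⟨hka', _, _⟩)
            · exact Or.inl (by rw [hrow_ne k hk hka]; exact hx)
            · exact absurd hka' hka
      · intro hnd k hk
        rw [hstep]
        apply ih3 _ k hk
        intro k' hk'
        by_cases hka : k' = a
        · subst hka
          rw [hrow_a]
          exact PySem.Set.nodup_add _ _ (hnd k' hk')
        · rw [hrow_ne k' hk' hka]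
          exact hnd k' hk'
    · have hba : a = b := by omega
      have hstep : pvF2 (b :: g) a nbr = pvF2 g a nbr := by
        unfold pvF2
        rw [List.foldl_cons, if_neg hab]
      obtain ⟨ih1, ih2, ih3⟩ := ih nbr a ha0 haL
      refine ⟨by rw [hstep, ih1], ?_, fun hnd k hk => by rw [hstep]; exact ih3 hnd k hk⟩
      intro k hk x
      rw [hstep, ih2 k hk x]
      subst hba
      constructor
      · rintro (hx | ⟨hka, hxg, hxa⟩)
        · exact Or.inl hx
        · exact Or.inr ⟨hka, List.mem_cons_of_mem _ hxg, hxa⟩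
      · rintro (hx | ⟨hka, hxag, hxa⟩)
        · exact Or.inl hx
        · rcases List.mem_cons.mp hxag with rfl | hxg
          · exact absurd rfl hxa
          · exact Or.inr ⟨hka, hxg, hxa⟩

lemma pvF1_fold_spec (g : List Int) :
    ∀ (gs : List Int) (nbr : List (List Int)),
      (∀ a ∈ gs, 0 ≤ a ∧ a < (nbr.length : Int)) →
      (gs.foldl (fun nbr a => pvF2 g a nbr) nbr).length = nbr.length ∧
      (∀ k : Int, 0 ≤ k → ∀ x : Int,
        (x ∈ pvRow (gs.foldl (fun nbr a => pvF2 g a nbr) nbr) k ↔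
          x ∈ pvRow nbr k ∨ (k ∈ gs ∧ x ∈ g ∧ x ≠ k))) ∧
      ((∀ k : Int, 0 ≤ k → (pvRow nbr k).Nodup) →
        ∀ k : Int, 0 ≤ k → (pvRow (gs.foldl (fun nbr a => pvF2 g a nbr) nbr) k).Nodup) := by
  intro gs
  induction gs with
  | nil =>
    intro nbr _
    exact ⟨rfl, fun k _ x => by simp, fun h => h⟩
  | cons a gs ih =>
    intro nbr hgs
    obtain ⟨ha0, haL⟩ := hgs a List.mem_cons_self
    obtain ⟨h21, h22, h23⟩ := pvF2_spec g nbr a ha0 haL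
    obtain ⟨ih1, ih2, ih3⟩ := ih (pvF2 g a nbr)
      (by intro a' ha'; rw [h21]; exact hgs a' (List.mem_cons_of_mem _ ha'))
    refine ⟨by rw [List.foldl_cons, ih1, h21], ?_, ?_⟩
    · intro k hk x
      rw [List.foldl_cons, ih2 k hk x, h22 k hk x]
      constructor
      · rintro ((hx | ⟨rfl, hxg, hxa⟩) | ⟨hkgs, hxg, hxk⟩)
        · exact Or.inl hx
        · exact Or.inr ⟨List.mem_cons_self, hxg, hxa⟩
        · exact Or.inr ⟨List.mem_cons_of_mem _ hkgs, hxg, hxk⟩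
      · rintro (hx | ⟨hkags, hxg, hxk⟩)
        · exact Or.inl (Or.inl hx)
        · rcases List.mem_cons.mp hkags with rfl | hkgs
          · exact Or.inl (Or.inr ⟨rfl, hxg, hxk⟩)
          · exact Or.inr ⟨hkgs, hxg, hxk⟩
    · intro hnd k hk
      rw [List.foldl_cons]
      exact ih3 (h23 hnd) k hk

lemma pvF1_spec (g : List Int) (nbr : List (List Int))
    (hb : ∀ a ∈ g, 0 ≤ a ∧ a < (nbr.length : Int)) :
    (pvF1 g nbr).length = nbr.length ∧
    (∀ k : Int, 0 ≤ k → ∀ x : Int,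
      (x ∈ pvRow (pvF1 g nbr) k ↔ x ∈ pvRow nbr k ∨ (k ∈ g ∧ x ∈ g ∧ x ≠ k))) ∧
    ((∀ k : Int, 0 ≤ k → (pvRow nbr k).Nodup) →
      ∀ k : Int, 0 ≤ k → (pvRow (pvF1 g nbr) k).Nodup) :=
  pvF1_fold_spec g g nbr hb

lemma pvF0_spec :
    ∀ (groups : List (List Int)) (nbr : List (List Int)),
      (∀ g ∈ groups, ∀ a ∈ g, 0 ≤ a ∧ a < (nbr.length : Int)) →
      (groups.foldl (fun nbr g => pvF1 g nbr) nbr).length = nbr.length ∧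
      (∀ k : Int, 0 ≤ k → ∀ x : Int,
        (x ∈ pvRow (groups.foldl (fun nbr g => pvF1 g nbr) nbr) k ↔
          x ∈ pvRow nbr k ∨ ∃ g ∈ groups, k ∈ g ∧ x ∈ g ∧ x ≠ k)) ∧
      ((∀ k : Int, 0 ≤ k → (pvRow nbr k).Nodup) →
        ∀ k : Int, 0 ≤ k → (pvRow (groups.foldl (fun nbr g => pvF1 g nbr) nbr) k).Nodup) := by
  intro groups
  induction groups with
  | nil =>
    intro nbr _
    exact ⟨rfl, fun k _ x => by simp, fun h => h⟩
  | cons g groups ih =>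
    intro nbr hgr
    obtain ⟨h11, h12, h13⟩ := pvF1_spec g nbr (fun a ha => hgr g List.mem_cons_self a ha)
    obtain ⟨ih1, ih2, ih3⟩ := ih (pvF1 g nbr)
      (by intro g' hg' a ha
          have : (pvF1 g nbr).length = nbr.length := h11
          rw [this]
          exact hgr g' (List.mem_cons_of_mem _ hg') a ha)
    refine ⟨by rw [List.foldl_cons, ih1]; exact h11, ?_, ?_⟩
    · intro k hk x
      rw [List.foldl_cons, ih2 k hk x, h12 k hk x]
      constructor
      · rintro ((hx | ⟨hkg, hxg, hxk⟩) | ⟨g', hg', hkg', hxg', hxk⟩)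
        · exact Or.inl hx
        · exact Or.inr ⟨g, List.mem_cons_self, hkg, hxg, hxk⟩
        · exact Or.inr ⟨g', List.mem_cons_of_mem _ hg', hkg', hxg', hxk⟩
      · rintro (hx | ⟨g', hg', hkg', hxg', hxk⟩)
        · exact Or.inl (Or.inl hx)
        · rcases List.mem_cons.mp hg' with rfl | hg''
          · exact Or.inl (Or.inr ⟨hkg', hxg', hxk⟩)
          · exact Or.inr ⟨g', hg'', hkg', hxg', hxk⟩
    · intro hnd k hk
      rw [List.foldl_cons]
      exact ih3 (h13 hnd) k hk

lemma pvNbr_bounds (cycles : List (List Int)) :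
    ∀ g ∈ (pvEmap cycles).values, ∀ a ∈ g, 0 ≤ a ∧ a < (cycles.length : Int) := by
  intro g hg a ha
  obtain ⟨e, rfl⟩ := pvValues_mem_getD cycles g hg
  have := (pvEmap_mem cycles e a).mp ha
  exact ⟨this.1, this.2.1⟩

lemma pvNbr_spec (cycles : List (List Int)) :
    (pvNbr cycles).length = cycles.length ∧
    (∀ k : Int, 0 ≤ k → ∀ x : Int,
      (x ∈ pvRow (pvNbr cycles) k ↔
        ∃ g ∈ (pvEmap cycles).values, k ∈ g ∧ x ∈ g ∧ x ≠ k)) ∧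
    (∀ k : Int, 0 ≤ k → (pvRow (pvNbr cycles) k).Nodup) := by
  have hlen0 : ((List.range cycles.length).map
      (fun _ => (PySem.Set.empty : PySem.Set Int))).length = cycles.length := by simp
  obtain ⟨h1, h2, h3⟩ := pvF0_spec (pvEmap cycles).values
    ((List.range cycles.length).map (fun _ => (PySem.Set.empty : PySem.Set Int)))
    (by rw [hlen0]; exact pvNbr_bounds cycles)
  have hempty : ∀ k : Int, 0 ≤ k →
      pvRow ((List.range cycles.length).map (fun _ => (PySem.Set.empty : PySem.Set Int))) k = [] := by
    intro k hk
    by_cases hkn : k < (cycles.length : Int)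
    · exact pvRow_const _ _ _ _ hk hkn
    · rw [pvRow_eq _ hk, List.getElem?_eq_none]
      · rfl
      · simp; omega
  refine ⟨?_, ?_, ?_⟩
  · unfold pvNbr
    rw [h1, hlen0]
  · intro k hk x
    unfold pvNbr
    rw [h2 k hk x, hempty k hk]
    simp
  · intro k hk
    unfold pvNbr
    apply h3 _ k hk
    intro k' hk'
    rw [hempty k' hk']
    exact List.nodup_nil

lemma pvNbr_mem (cycles : List (List Int)) (k x : Int) (hk0 : 0 ≤ k)
    (hkn : k < (cycles.length : Int)) :
    x ∈ pvRow (pvNbr cycles) k ↔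
      (0 ≤ x ∧ x < (cycles.length : Int) ∧ x ≠ k ∧ pvS cycles k x = true) := by
  rw [(pvNbr_spec cycles).2.1 k hk0 x]
  constructor
  · rintro ⟨g, hgv, hkg, hxg, hxk⟩
    obtain ⟨e, rfl⟩ := pvValues_mem_getD cycles g hgv
    have hkm := (pvEmap_mem cycles e k).mp hkg
    have hxm := (pvEmap_mem cycles e x).mp hxg
    refine ⟨hxm.1, hxm.2.1, hxk, ?_⟩
    exact (pvShared_iff _ _).mpr ⟨e, hkm.2.2, hxm.2.2⟩
  · rintro ⟨hx0, hxn, hxk, hS⟩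
    obtain ⟨e, hek, hex⟩ := (pvShared_iff _ _).mp hS
    have hkmem : k ∈ (pvEmap cycles).getD e [] :=
      (pvEmap_mem cycles e k).mpr ⟨hk0, hkn, hek⟩
    have hxmem : x ∈ (pvEmap cycles).getD e [] :=
      (pvEmap_mem cycles e x).mpr ⟨hx0, hxn, hex⟩
    exact ⟨(pvEmap cycles).getD e [],
      pvGetD_mem_values cycles e (List.ne_nil_of_mem hkmem), hkmem, hxmem, hxk⟩

lemma pvAdjB_spec (cycles : List (List Int)) : pvAdjB cycles = pvSpec cycles := by
  apply List.ext_getElem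
  · simp [pvAdjB, pvSpec, (pvNbr_spec cycles).1]
  · intro m h1 h2
    have hm : m < cycles.length := by
      have := (pvNbr_spec cycles).1
      simp [pvAdjB] at h1
      omega
    have hget : ∀ (hh : m < (pvSpec cycles).length),
        (pvSpec cycles)[m]'hh = pvSpecRow cycles (cycles.length : Int) (m : Int) := by
      intro hh
      simp only [pvSpec]
      rw [List.getElem_map, List.getElem_range]
    rw [hget h2]
    have hAB : (pvAdjB cycles)[m]'h1 =
        PySem.List.sorted (pvRow (pvNbr cycles) (m : Int)) (fun x => x) false := by
      simp only [pvAdjB, List.getElem_map]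
      congr 1
      rw [pvRow_eq (pvNbr cycles) (k := (m : Int)) (by omega)]
      rw [show ((m : Int)).toNat = m from by omega]
      rw [List.getElem?_eq_getElem (by rw [(pvNbr_spec cycles).1]; exact hm)]
      rfl
    rw [hAB]
    unfold pvSpecRow
    apply PySem.List.sorted_eq_of_perm_of_pairwise_lt
    · rw [List.perm_ext_iff_of_nodup
        (List.Nodup.filter _ (PySem.List.nodup_pyRange_one 0 (cycles.length : Int)))
        ((pvNbr_spec cycles).2.2 (m : Int) (by omega))]
      intro a
      rw [List.mem_filter, PySem.List.mem_pyRange_one,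
        pvNbr_mem cycles (m : Int) a (by omega) (by omega)]
      constructor
      · rintro ⟨⟨ha0, han⟩, hcond⟩
        have := Bool.and_eq_true_iff.mp hcond
        refine ⟨ha0, han, by simpa using this.1, this.2⟩
      · rintro ⟨ha0, han, hne, hS⟩
        exact ⟨⟨ha0, han⟩, Bool.and_eq_true_iff.mpr ⟨by simpa using hne, hS⟩⟩
    · exact List.Pairwise.filter _ (PySem.List.pairwise_lt_pyRange_one 0 (cycles.length : Int))

theorem pv_main (cycles : List (List Int)) :
    cycle_graph_components cycles = cycle_graph_components_alt cycles := by
  by_cases h : cycles = []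
  · subst h; rfl
  · have hA : cycle_graph_components cycles = pvRunDFS (pvAdjA cycles) cycles.length := by
      unfold cycle_graph_components
      rw [if_neg h]
      rfl
    have hB : cycle_graph_components_alt cycles = pvRunDFS (pvAdjB cycles) cycles.length := by
      unfold cycle_graph_components_alt
      rw [if_neg h]
      rfl
    rw [hA, hB, pvAdjA_spec, pvAdjB_spec]

-- ===== VERDICT (by name: the statement is the Claim_ definition above) =====
theorem cycle_graph_components_spec : Claim_equal_cycle_graph_components := by
  intro cycles _ _
  unfold Spec_cycle_graph_components
  exact pv_main cycles
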